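-- pv_equiv track=rewrite | github.com/MillPRE/Programmers-Algorithm | 코딩 기초 트레이닝/5명씩-p181886/5명씩.py | solution
-- ===== SOURCE A (Python) =====
-- def solution(names):
--     answer = []
--
--     temp = []
--     for name in names:
--         temp.append(name)
--
--         if len(temp) == 5:
--             answer.append(temp[0])
--             temp.clear()
--
--     if len(temp) != 0:
--         answer.append(temp[0])
--
--     return answer
-- ===== SOURCE B (Python) =====
-- def solution(names):
--     answer = []
--     for i, name in enumerate(names):
--         if i % 5 == 0:
--             answer.append(name)
--     return answer
-- ===== Notes on version B (the rewrite author's own statement) =====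
-- stated objective: simpler
-- what changed: Replaces the 5-element buffer with fill/clear and leftover-flush branches by a single enumerate pass that appends the name whenever the position index is divisible by 5.
import Mathlib
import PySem

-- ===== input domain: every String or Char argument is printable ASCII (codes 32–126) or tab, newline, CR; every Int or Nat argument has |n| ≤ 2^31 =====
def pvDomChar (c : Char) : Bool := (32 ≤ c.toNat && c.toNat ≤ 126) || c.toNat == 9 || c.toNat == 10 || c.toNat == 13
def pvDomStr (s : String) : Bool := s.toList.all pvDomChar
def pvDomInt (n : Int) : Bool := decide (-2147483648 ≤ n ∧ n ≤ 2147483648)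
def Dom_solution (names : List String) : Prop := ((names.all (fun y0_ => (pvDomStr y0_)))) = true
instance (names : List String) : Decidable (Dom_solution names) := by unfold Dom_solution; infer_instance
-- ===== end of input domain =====

-- B drops A's 5-element buffer (fill / emit temp[0] / clear / flush leftover) for a
-- single enumerate pass appending the name whenever the index is divisible by 5 (simpler).

-- ===== PORT A =====
-- the loop: state is (answer, temp); temp fills to 5, then temp[0] is emitted and temp cleared;
-- after the loop a nonempty temp flushes temp[0].  temp[0] is taken where temp is provably
-- nonempty in Python, ported as head?.getD "".
def solutionLoop : List String → List String → List String → List String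
  | [], answer, temp => if temp.length ≠ 0 then answer ++ [(temp.head?).getD ""] else answer
  | name :: rest, answer, temp =>
      let temp' := temp ++ [name]
      if temp'.length = 5 then solutionLoop rest (answer ++ [(temp'.head?).getD ""]) []
      else solutionLoop rest answer temp'

def solution (names : List String) : List String := solutionLoop names [] []

-- ===== PORT B =====
-- enumerate pass: state is (answer, i); append name iff i % 5 == 0
def solutionAltLoop : List String → List String → Nat → List String
  | [], answer, _ => answer
  | name :: rest, answer, i =>
      solutionAltLoop rest (if i % 5 = 0 then answer ++ [name] else answer) (i + 1)

def solution_alt (names : List String) : List String := solutionAltLoop names [] 0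

-- ===== PRECONDITION & SPEC =====
def Spec_solution (names : List String) (out : List String) : Prop := out = solution_alt names
instance (names : List String) (out : List String) : Decidable (Spec_solution names out) := by unfold Spec_solution; infer_instance

-- ===== CLAIM (what is proved, stated in full; the proofs are below) =====
def Claim_equal_solution : Prop := ∀ (names : List String), Dom_solution names → Spec_solution names (solution names)

-- ===== LEMMAS AND PROOFS =====

-- Invariant: with temp.length = i % 5, A's pending 'temp[0]' is exactly what B has already
-- appended, so B's running answer is A's plus that head (if any).
theorem loop_inv : ∀ (names answer temp : List String) (i : Nat),
    temp.length = i % 5 →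
    solutionLoop names answer temp
      = solutionAltLoop names (answer ++ ((temp.head?.map ([·])).getD [])) i := by
  intro names
  induction names with
  | nil =>
    intro answer temp i h
    cases temp <;> simp [solutionLoop, solutionAltLoop]
  | cons name rest ih =>
    intro answer temp i h
    by_cases h5 : temp.length + 1 = 5
    · -- buffer fills: A emits temp[0] and clears; B's i % 5 = 4, no append
      have hi : i % 5 = 4 := by omega
      have hne : temp ≠ [] := by intro he; simp [he] at h5
      obtain ⟨t, ts, rfl⟩ := List.exists_cons_of_ne_nil hne
      have hts : ts.length = 3 := by simp at h; omega
      have hi1 : (i + 1) % 5 = 0 := by omega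
      simp only [solutionLoop]
      rw [if_pos (by simp [hts])]
      rw [ih _ [] (i + 1) (by simpa using hi1.symm)]
      simp [solutionAltLoop, hi]
    · -- buffer not full: A keeps appending; B appends iff i % 5 = 0 (temp empty)
      have hlt : i % 5 < 5 := Nat.mod_lt _ (by omega)
      simp only [solutionLoop]
      rw [if_neg (by simp; omega)]
      rw [ih answer (temp ++ [name]) (i + 1) (by simp [h]; omega)]
      cases temp with
      | nil =>
        have : i % 5 = 0 := by simpa using h.symm
        simp [solutionAltLoop, this]
      | cons t ts =>
        have : i % 5 ≠ 0 := by simp [← h]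
        simp [solutionAltLoop, this]

-- ===== VERDICT (by name: the statement is the Claim_ definition above) =====
theorem solution_spec : Claim_equal_solution := by
  intro names _
  unfold Spec_solution solution solution_alt
  simpa using loop_inv names [] [] 0 rfl
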